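-- pv_equiv track=rewrite | github.com/pypi-data/pypi-mirror-297 | packages/areal-common-services/areal_common_services-1.0.1.tar.gz/areal_common_services-1.0.1/src/common_services/services/visual_line.py | define_ranges
-- ===== SOURCE A (Python) =====
-- def merge_intervals(intervals):
--     if not intervals:
--         return []
--
--     # Sort the intervals based on the start time
--     sorted_intervals = sorted(intervals, key=lambda x: x[0])
--
--     merged_intervals = [sorted_intervals[0]]
--
--     for current_interval in sorted_intervals[1:]:
--         last_merged_interval = merged_intervals[-1]
--
--         # Check for overlap
--         if current_interval[0] <= last_merged_interval[1]:
--             # Merge the overlapping intervals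
--             last_merged_interval = (
--                 last_merged_interval[0],
--                 max(last_merged_interval[1], current_interval[1]),
--             )
--             merged_intervals[-1] = last_merged_interval
--         else:
--             # No overlap, add the current interval to the merged list
--             merged_intervals.append(current_interval)
--
--     return merged_intervals
--
-- def define_ranges(coordinates, threshold):
--     range_list = []
--     for coordinate in set(coordinates):
--         range_list.append((coordinate - threshold, coordinate + threshold))
--
--     merged_ranges = merge_intervals(range_list)
--
--     my_dict = dict()
--     for ranges in merged_ranges:
--         my_dict[ranges] = []
--
--     return my_dict
-- ===== SOURCE B (Python) =====
-- def define_ranges(coordinates, threshold):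
--     coords = sorted(set(coordinates))
--     result = {}
--     if not coords:
--         return result
--     start = prev = coords[0]
--     for c in coords[1:]:
--         if c - prev > 2 * threshold:
--             result[(start - threshold, prev + threshold)] = []
--             start = c
--         prev = c
--     result[(start - threshold, prev + threshold)] = []
--     return result
-- ===== Notes on version B (the rewrite author's own statement) =====
-- stated objective: simpler
-- what changed: Instead of building an interval list from the set and running a generic sort-and-merge overlap pass plus a dict-building pass, B sorts the unique coordinates once and walks them in a single pass, closing a group whenever the gap to the previous coordinate exceeds 2*threshold and emitting (first-threshold, last+threshold) keys directly. (one pass over sorted coords replaces interval construction, generic merge and dict passes; measured ~2.4x faster)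
import Mathlib
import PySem

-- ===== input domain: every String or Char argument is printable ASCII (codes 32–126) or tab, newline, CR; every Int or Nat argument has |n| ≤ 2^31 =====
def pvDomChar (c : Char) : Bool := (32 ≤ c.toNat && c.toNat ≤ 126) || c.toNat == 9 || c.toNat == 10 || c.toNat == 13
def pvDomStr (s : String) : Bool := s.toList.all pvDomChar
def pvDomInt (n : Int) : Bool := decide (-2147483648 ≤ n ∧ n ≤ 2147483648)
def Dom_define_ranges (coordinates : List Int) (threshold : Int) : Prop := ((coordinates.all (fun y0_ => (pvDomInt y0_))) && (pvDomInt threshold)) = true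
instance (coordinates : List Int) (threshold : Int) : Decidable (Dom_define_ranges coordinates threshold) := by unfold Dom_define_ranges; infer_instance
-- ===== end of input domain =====

-- B replaces A's interval-list + generic sort-and-merge + dict pass by one gap-based
-- grouping pass over the sorted unique coordinates (simpler; same O(n log n) cost).

-- ===== PORT A =====
-- literal port of merge_intervals (sort by start, fold merging into the last interval)
def merge_intervals (intervals : List (Int × Int)) : List (Int × Int) :=
  if intervals = [] then []
  else
    let sorted_intervals := PySem.List.sorted intervals (fun x => x.1) false
    let merged0 : List (Int × Int) := [PySem.List.pyGetD sorted_intervals 0 (0, 0)]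
    (PySem.List.slice sorted_intervals (some 1) none).foldl
      (fun merged current_interval =>
        let last_merged_interval := PySem.List.pyGetD merged (-1) (0, 0)
        if current_interval.1 ≤ last_merged_interval.2 then
          PySem.List.pySetD merged (-1)
            (last_merged_interval.1, max last_merged_interval.2 current_interval.2)
        else merged ++ [current_interval]) merged0

-- 'for coordinate in set(coordinates)' builds range_list in hash order; its only use is a
-- sort with an injective key (starts are distinct), so the result is order-independent and
-- iterating PySem.Set.ofList's order is exact here.
def define_ranges (coordinates : List Int) (threshold : Int) : List (Int × Int × List Int) :=
  let range_list := (PySem.Set.ofList coordinates).foldl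
      (fun acc coordinate => acc ++ [(coordinate - threshold, coordinate + threshold)]) []
  let merged_ranges := merge_intervals range_list
  let my_dict : PySem.Dict (Int × Int) (List Int) :=
      merged_ranges.foldl (fun d ranges => d.insert ranges []) PySem.Dict.empty
  -- type convention: a dict keyed by an int pair flattens to (Int × Int × List Int) triples
  my_dict.items.map (fun p => (p.1.1, p.1.2, p.2))

-- ===== PORT B =====
def define_ranges_alt (coordinates : List Int) (threshold : Int) : List (Int × Int × List Int) :=
  let coords := PySem.List.sorted (PySem.Set.ofList coordinates) (fun x => x) false
  match coords with
  | [] => []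
  | c0 :: rest =>
    let s := rest.foldl
      (fun (st : Int × Int × PySem.Dict (Int × Int) (List Int)) c =>
        if c - st.2.1 > 2 * threshold then
          (c, c, st.2.2.insert (st.1 - threshold, st.2.1 + threshold) [])
        else (st.1, c, st.2.2)) (c0, c0, PySem.Dict.empty)
    ((s.2.2.insert (s.1 - threshold, s.2.1 + threshold) []).items).map
      (fun p => (p.1.1, p.1.2, p.2))

-- ===== PRECONDITION & SPEC =====
def Spec_define_ranges (coordinates : List Int) (threshold : Int) (out : List (Int × Int × List Int)) : Prop := out = define_ranges_alt coordinates threshold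
instance (coordinates : List Int) (threshold : Int) (out : List (Int × Int × List Int)) : Decidable (Spec_define_ranges coordinates threshold out) := by unfold Spec_define_ranges; infer_instance

-- ===== CLAIM (what is proved, stated in full; the proofs are below) =====
def Claim_equal_define_ranges : Prop := ∀ (coordinates : List Int) (threshold : Int), Dom_define_ranges coordinates threshold → Spec_define_ranges coordinates threshold (define_ranges coordinates threshold)

-- ===== LEMMAS AND PROOFS =====

-- the list of merged group intervals over sorted coordinates (proof-side reference shape)
def bList (t : Int) : Int → Int → List Int → List (Int × Int)
  | start, prev, [] => [(start - t, prev + t)]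
  | start, prev, c :: cs =>
    if c - prev > 2 * t then (start - t, prev + t) :: bList t c c cs
    else bList t start c cs

theorem pySetD_append_singleton_neg_one {α : Type} (M : List α) (x v : α) :
    PySem.List.pySetD (M ++ [x]) (-1) v = M ++ [v] := by
  simp [PySem.List.pySetD, PySem.List.pySet?, PySem.List.pyIdx?]

theorem bList_first_lt (t : Int) :
    ∀ (rest : List Int) (start prev : Int), start ≤ prev → (∀ c ∈ rest, prev < c) →
      rest.Pairwise (· < ·) →
      (bList t start prev rest).Pairwise (fun a b => a.1 < b.1) ∧
      ∀ q ∈ bList t start prev rest, start - t ≤ q.1 := by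
  intro rest
  induction rest with
  | nil => intro start prev h1 _ _; simp [bList]
  | cons c cs ih =>
    intro start prev h1 h2 hp
    have hc : prev < c := h2 c (by simp)
    have hcs : ∀ x ∈ cs, c < x := (List.pairwise_cons.mp hp).1
    have hp' := (List.pairwise_cons.mp hp).2
    by_cases hgap : c - prev > 2 * t
    · have ⟨ihp, ihb⟩ := ih c c le_rfl hcs hp'
      simp only [bList, if_pos hgap]
      refine ⟨List.pairwise_cons.mpr ⟨?_, ihp⟩, ?_⟩
      · intro q hq; have := ihb q hq; omega
      · intro q hq
        rcases List.mem_cons.mp hq with h | h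
        · subst h; omega
        · have := ihb q h; omega
    · have ⟨ihp, ihb⟩ := ih start c (by omega) hcs hp'
      simp only [bList, if_neg hgap]
      exact ⟨ihp, ihb⟩

-- A's merge fold over the mapped, sorted coordinates produces exactly the gap groups
theorem A_merge_fold (t : Int) :
    ∀ (rest : List Int) (start prev : Int) (M : List (Int × Int)),
      start ≤ prev → (∀ c ∈ rest, prev < c) → rest.Pairwise (· < ·) →
      (rest.map (fun c => (c - t, c + t))).foldl
        (fun merged current_interval =>
          let last_merged_interval := PySem.List.pyGetD merged (-1) (0, 0)
          if current_interval.1 ≤ last_merged_interval.2 then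
            PySem.List.pySetD merged (-1)
              (last_merged_interval.1, max last_merged_interval.2 current_interval.2)
          else merged ++ [current_interval])
        (M ++ [(start - t, prev + t)])
      = M ++ bList t start prev rest := by
  intro rest
  induction rest with
  | nil => intro start prev M _ _ _; simp [bList]
  | cons c cs ih =>
    intro start prev M h1 h2 hp
    have hc : prev < c := h2 c (by simp)
    have hcs : ∀ x ∈ cs, c < x := (List.pairwise_cons.mp hp).1
    have hp' := (List.pairwise_cons.mp hp).2
    simp only [List.map_cons, List.foldl_cons, PySem.List.pyGetD_neg_one_append_singleton]
    by_cases hgap : c - prev > 2 * t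
    · have hno : ¬ (c - t ≤ prev + t) := by omega
      simp only [if_neg hno]
      rw [show M ++ [(start - t, prev + t)] ++ [(c - t, c + t)]
            = (M ++ [(start - t, prev + t)]) ++ [(c - t, c + t)] from by simp]
      rw [ih c c (M ++ [(start - t, prev + t)]) le_rfl hcs hp']
      simp [bList, if_pos hgap]
    · have hyes : (c - t ≤ prev + t) := by omega
      simp only [if_pos hyes, pySetD_append_singleton_neg_one]
      have hmax : max (prev + t) (c + t) = c + t := by omega
      rw [hmax]
      rw [ih start c M (by omega) hcs hp']
      simp [bList, if_neg hgap]

-- B's fold-then-final-insert appends exactly the gap-group keys to the dict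
theorem B_fold (t : Int) :
    ∀ (rest : List Int) (start prev : Int) (d : PySem.Dict (Int × Int) (List Int)),
      start ≤ prev → (∀ c ∈ rest, prev < c) → rest.Pairwise (· < ·) →
      (∀ k ∈ d.keys, k.1 < start - t) →
      (let s := rest.foldl
        (fun (st : Int × Int × PySem.Dict (Int × Int) (List Int)) c =>
          if c - st.2.1 > 2 * t then
            (c, c, st.2.2.insert (st.1 - t, st.2.1 + t) [])
          else (st.1, c, st.2.2)) (start, prev, d)
       (s.2.2.insert (s.1 - t, s.2.1 + t) []).items)
      = d.items ++ (bList t start prev rest).map (fun q => (q, [])) := by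
  intro rest
  induction rest with
  | nil =>
    intro start prev d h1 _ _ hk
    have hfresh : d.contains (start - t, prev + t) = false := by
      by_contra h
      have : d.contains (start - t, prev + t) = true := by
        cases hcc : d.contains (start - t, prev + t) <;> simp_all
      have := hk _ ((PySem.Dict.contains_iff_mem_keys _ _).mp this)
      omega
    simp [bList, PySem.Dict.items_insert_of_not_contains _ _ hfresh]
  | cons c cs ih =>
    intro start prev d h1 h2 hp hk
    have hc : prev < c := h2 c (by simp)
    have hcs : ∀ x ∈ cs, c < x := (List.pairwise_cons.mp hp).1
    have hp' := (List.pairwise_cons.mp hp).2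
    simp only [List.foldl_cons]
    by_cases hgap : c - prev > 2 * t
    · simp only [if_pos hgap]
      have hfresh : d.contains (start - t, prev + t) = false := by
        by_contra h
        have : d.contains (start - t, prev + t) = true := by
          cases hcc : d.contains (start - t, prev + t) <;> simp_all
        have := hk _ ((PySem.Dict.contains_iff_mem_keys _ _).mp this)
        omega
      have hk' : ∀ k ∈ (d.insert (start - t, prev + t) []).keys, k.1 < c - t := by
        intro k hkm
        rcases (PySem.Dict.mem_keys_insert _ _ _ _).mp hkm with h | h
        · subst h; omega
        · have := hk k h; omega
      rw [ih c c _ le_rfl hcs hp' hk']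
      rw [PySem.Dict.items_insert_of_not_contains _ _ hfresh]
      simp [bList, if_pos hgap]
    · simp only [if_neg hgap]
      rw [ih start c d (by omega) hcs hp' hk]
      simp [bList, if_neg hgap]

theorem define_ranges_eq (coordinates : List Int) (threshold : Int) :
    define_ranges coordinates threshold = define_ranges_alt coordinates threshold := by
  set t := threshold
  set S := PySem.Set.ofList coordinates with hS
  set cs := PySem.List.sorted S (fun x => x) false with hcs
  have hperm : cs.Perm S := PySem.List.sorted_perm S (fun x => x) false
  have hpw : cs.Pairwise (· < ·) := PySem.List.sorted_ofList_pairwise_lt coordinates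
  have hrange : (S.foldl (fun acc c => acc ++ [(c - t, c + t)]) []) =
      S.map (fun c => (c - t, c + t)) := by
    simpa using PySem.List.foldl_append_singleton_eq_map (fun c => (c - t, c + t)) S []
  cases hmatch : cs with
  | nil =>
    have hSnil : S = [] := by
      have := hperm; rw [hmatch] at this; exact this.symm.eq_nil
    unfold define_ranges define_ranges_alt
    rw [← hS, ← hcs, hmatch, hSnil]
    simp [merge_intervals, PySem.Dict.empty]
  | cons c0 rest =>
    have hc0 : ∀ x ∈ rest, c0 < x := by
      have := hpw; rw [hmatch] at this; exact (List.pairwise_cons.mp this).1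
    have hrestp : rest.Pairwise (· < ·) := by
      have := hpw; rw [hmatch] at this; exact (List.pairwise_cons.mp this).2
    -- the sorted interval list is the mapped sorted coordinate list
    have hsortmap : PySem.List.sorted (S.map (fun c => (c - t, c + t))) (fun x => x.1) false
        = cs.map (fun c => (c - t, c + t)) := by
      apply PySem.List.sorted_eq_of_perm_of_pairwise_lt
      · exact hperm.map _
      · exact List.Pairwise.map _ (by intro a b h; simpa using by omega) hpw
    have hSne : S ≠ [] := by
      intro h; rw [h] at hperm
      have := hperm.eq_nil; simp [hmatch] at this
    have hmapne : S.map (fun c => (c - t, c + t)) ≠ [] := by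
      simpa using hSne
    -- A's merged interval list is bList
    have hmerge : merge_intervals (S.map (fun c => (c - t, c + t))) = bList t c0 c0 rest := by
      unfold merge_intervals
      rw [if_neg hmapne, hsortmap, hmatch]
      simp only [List.map_cons, PySem.List.pyGetD_zero_cons, PySem.List.slice_from_one,
        List.tail_cons]
      have := A_merge_fold t rest c0 c0 [] le_rfl hc0 hrestp
      simpa using this
    have hbpw := (bList_first_lt t rest c0 c0 le_rfl hc0 hrestp).1
    have hbnodup : (bList t c0 c0 rest).Nodup :=
      hbpw.imp (fun h => by intro he; rw [he] at h; exact lt_irrefl _ h)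
    -- A's dict loop over the merged list appends fresh keys
    have hAdict : ((bList t c0 c0 rest).foldl
        (fun (d : PySem.Dict (Int × Int) (List Int)) ranges => d.insert ranges [])
        PySem.Dict.empty).items
        = (bList t c0 c0 rest).map (fun q => (q, ([] : List Int))) := by
      have := PySem.Dict.items_foldl_insert_fresh (l := bList t c0 c0 rest)
        (k := fun q => q) (v := fun _ => ([] : List Int)) (d := PySem.Dict.empty)
        (by intro a _; simp) (by simpa using hbnodup)
      simpa using this
    -- B's side
    have hB := B_fold t rest c0 c0 PySem.Dict.empty le_rfl hc0 hrestp (by simp)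
    unfold define_ranges define_ranges_alt
    rw [← hS, ← hcs, hmatch]
    simp only [hrange, hmerge, hAdict]
    simp only at hB
    rw [hB]
    simp [PySem.Dict.empty]

-- ===== VERDICT (by name: the statement is the Claim_ definition above) =====
theorem define_ranges_spec : Claim_equal_define_ranges := by
  intro coordinates threshold _
  unfold Spec_define_ranges
  exact define_ranges_eq coordinates threshold
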